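-- pv_equiv track=rewrite | github.com/k-shibuki/lyra | src/report/validator.py | validate_urls
-- ===== SOURCE A (Python) =====
-- from typing import Any, TypedDict
--
-- def validate_urls(
--     report_urls: set[str],
--     citation_index: dict[str, Any],
-- ) -> list[dict[str, Any]]:
--     """
--     Validate that all report URLs are in citation_index.
--
--     Returns list of hallucinated URL violations.
--     """
--     allowed_urls = set(citation_index.keys())
--     violations = []
--
--     for url in report_urls:
--         # Normalize URL for comparison
--         normalized = url.rstrip("/")
--
--         # Check if URL or a prefix matches
--         is_valid = False
--         for allowed in allowed_urls:
--             if normalized.startswith(allowed.rstrip("/")) or allowed.rstrip("/").startswith(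
--                 normalized
--             ):
--                 is_valid = True
--                 break
--
--         # Also allow DOI URLs
--         if url.startswith("DOI:") or "doi.org" in url:
--             is_valid = True
--
--         if not is_valid:
--             violations.append(
--                 {
--                     "url": url,
--                     "reason": "URL not found in citation_index",
--                 }
--             )
--
--     return violations
-- ===== SOURCE B (Python) =====
-- def validate_urls(report_urls, citation_index):
--     """Prefix-index re-implementation: one set of stripped allowed URLs and one
--     set of all their prefixes, so each report URL is checked in O(L) lookups
--     instead of a scan over every allowed URL."""
--     stripped = {k.rstrip("/") for k in citation_index}
--     prefixes = {a[:k] for a in stripped for k in range(len(a) + 1)}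
--     violations = []
--     for url in report_urls:
--         if url.startswith("DOI:") or "doi.org" in url:
--             continue
--         n = url.rstrip("/")
--         if n in prefixes:  # n is a prefix of some allowed URL (or equal)
--             continue
--         if any(n[:k] in stripped for k in range(len(n))):  # some allowed URL is a proper prefix of n
--             continue
--         violations.append({"url": url, "reason": "URL not found in citation_index"})
--     return violations
-- ===== Notes on version B (the rewrite author's own statement) =====
-- stated objective: faster
-- what changed: Replaces the per-URL linear scan over all allowed URLs by two hash sets built once (stripped allowed URLs and all their prefixes), so each report URL is validated by O(L) set lookups instead of comparing against every allowed URL.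
import Mathlib
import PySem

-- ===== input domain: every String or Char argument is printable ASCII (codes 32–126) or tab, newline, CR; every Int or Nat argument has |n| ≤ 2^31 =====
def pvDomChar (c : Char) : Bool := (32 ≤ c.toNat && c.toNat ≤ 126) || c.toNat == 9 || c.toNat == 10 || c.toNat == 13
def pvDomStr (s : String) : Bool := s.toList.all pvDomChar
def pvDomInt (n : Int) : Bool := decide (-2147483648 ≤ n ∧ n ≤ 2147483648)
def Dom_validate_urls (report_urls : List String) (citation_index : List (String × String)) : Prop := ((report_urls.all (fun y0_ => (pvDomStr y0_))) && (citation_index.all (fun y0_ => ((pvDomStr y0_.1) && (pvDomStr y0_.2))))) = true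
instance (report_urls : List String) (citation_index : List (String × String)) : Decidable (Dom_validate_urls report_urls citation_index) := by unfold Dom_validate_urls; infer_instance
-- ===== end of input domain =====

-- B replaces A's per-URL scan over every allowed URL by two sets built once
-- (the stripped allowed URLs and all their prefixes), checked per report URL in O(L) lookups.

-- ===== PORT A =====
-- hand port of Python's url.rstrip("/") (PySem has no rstrip with a chars argument):
-- drop trailing '/' characters; exact.
def rstripSlash (s : String) : String :=
  String.ofList ((s.toList.reverse.dropWhile (fun c => c == '/')).reverse)

def validate_urls (report_urls : List String) (citation_index : List (String × String)) : List (List (String × String)) :=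
  let allowed_urls : PySem.Set String := PySem.Set.ofList ((PySem.Dict.mk citation_index).keys)
  report_urls.foldl (fun violations url =>
    let normalized := rstripSlash url
    -- inner 'for allowed … break' sets a flag on the first hit: existence over the set (order-independent)
    let is_valid := allowed_urls.any (fun allowed =>
      PySem.Str.startswith normalized (rstripSlash allowed) ||
        PySem.Str.startswith (rstripSlash allowed) normalized)
    let is_valid := if PySem.Str.startswith url "DOI:" || PySem.Str.isIn "doi.org" url then true else is_valid
    if !is_valid then
      violations ++ [[("url", url), ("reason", "URL not found in citation_index")]]
    else violations) []

-- ===== PORT B =====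
def validate_urls_alt (report_urls : List String) (citation_index : List (String × String)) : List (List (String × String)) :=
  let stripped : PySem.Set String :=
    PySem.Set.ofList (((PySem.Dict.mk citation_index).keys).map (fun k => rstripSlash k))
  let prefixes : PySem.Set String :=
    PySem.Set.ofList (stripped.flatMap (fun a =>
      (PySem.List.pyRange 0 (PySem.Str.len a + 1) 1).map (fun k => PySem.Str.slice a none (some k))))
  report_urls.foldl (fun violations url =>
    if PySem.Str.startswith url "DOI:" || PySem.Str.isIn "doi.org" url then violations
    else
      let n := rstripSlash url
      if PySem.Set.contains prefixes n then violations
      else if (PySem.List.pyRange 0 (PySem.Str.len n) 1).any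
          (fun k => PySem.Set.contains stripped (PySem.Str.slice n none (some k))) then violations
      else
        violations ++ [[("url", url), ("reason", "URL not found in citation_index")]]) []

-- ===== PRECONDITION & SPEC =====
def Spec_validate_urls (report_urls : List String) (citation_index : List (String × String)) (out : List (List (String × String))) : Prop := out = validate_urls_alt report_urls citation_index
instance (report_urls : List String) (citation_index : List (String × String)) (out : List (List (String × String))) : Decidable (Spec_validate_urls report_urls citation_index out) := by unfold Spec_validate_urls; infer_instance

-- ===== CLAIM (what is proved, stated in full; the proofs are below) =====
def Claim_equal_validate_urls : Prop := ∀ (report_urls : List String) (citation_index : List (String × String)), Dom_validate_urls report_urls citation_index → Spec_validate_urls report_urls citation_index (validate_urls report_urls citation_index)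

-- ===== LEMMAS AND PROOFS =====

-- n is one of the slices a[:j], 0 ≤ j ≤ len(a), exactly when n's characters are a prefix of a's
theorem slice_ex_iff_prefix (n a : String) :
    (∃ j : Int, (0 ≤ j ∧ j < PySem.Str.len a + 1) ∧ n = PySem.Str.slice a none (some j)) ↔
      n.toList <+: a.toList := by
  constructor
  · rintro ⟨j, ⟨h0, _⟩, rfl⟩
    rw [PySem.Str.toList_slice, PySem.Chars.slice_eq_listSlice, PySem.List.slice_to _ h0]
    exact List.take_prefix _ _
  · intro h
    refine ⟨(n.toList.length : Int), ⟨by positivity, ?_⟩, ?_⟩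
    · have := h.length_le
      rw [PySem.Str.len_eq]
      omega
    · rw [String.ext_iff, PySem.Str.toList_slice, PySem.Chars.slice_eq_listSlice,
        PySem.List.slice_to_natCast]
      exact List.prefix_iff_eq_take.mp h

-- a is one of the PROPER slices n[:j], 0 ≤ j < len(n), exactly when a is a strict prefix of n
theorem proper_slice_ex_iff_strict_prefix (n a : String) :
    (∃ j : Int, (0 ≤ j ∧ j < PySem.Str.len n) ∧ a = PySem.Str.slice n none (some j)) ↔
      (a.toList <+: n.toList ∧ a.toList.length < n.toList.length) := by
  constructor
  · rintro ⟨j, ⟨h0, hlt⟩, rfl⟩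
    rw [PySem.Str.toList_slice, PySem.Chars.slice_eq_listSlice, PySem.List.slice_to _ h0]
    refine ⟨List.take_prefix _ _, ?_⟩
    rw [PySem.Str.len_eq] at hlt
    rw [List.length_take]
    have : j.toNat < n.toList.length := by omega
    omega
  · rintro ⟨h, hl⟩
    refine ⟨(a.toList.length : Int), ⟨by positivity, ?_⟩, ?_⟩
    · rw [PySem.Str.len_eq]; omega
    · rw [String.ext_iff, PySem.Str.toList_slice, PySem.Chars.slice_eq_listSlice,
        PySem.List.slice_to_natCast]
      exact List.prefix_iff_eq_take.mp h

-- the per-URL validity checks of A and B agree: a bidirectional prefix match against some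
-- stripped key = (n is a prefix of some stripped key) or (some stripped key is a strict prefix of n)
theorem valid_eq (url : String) (K : List String) :
    (PySem.Set.ofList K).any (fun allowed =>
      PySem.Str.startswith (rstripSlash url) (rstripSlash allowed) ||
        PySem.Str.startswith (rstripSlash allowed) (rstripSlash url))
    = (PySem.Set.contains
        (PySem.Set.ofList ((PySem.Set.ofList (K.map (fun k => rstripSlash k))).flatMap (fun a =>
          (PySem.List.pyRange 0 (PySem.Str.len a + 1) 1).map (fun k => PySem.Str.slice a none (some k)))))
        (rstripSlash url)
      || (PySem.List.pyRange 0 (PySem.Str.len (rstripSlash url)) 1).any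
          (fun k => PySem.Set.contains (PySem.Set.ofList (K.map (fun k => rstripSlash k)))
            (PySem.Str.slice (rstripSlash url) none (some k)))) := by
  rw [Bool.eq_iff_iff]
  simp only [List.any_eq_true, Bool.or_eq_true, PySem.Str.startswith_eq,
    PySem.Chars.startswith_iff, PySem.Set.contains_iff, PySem.Set.mem_ofList,
    List.mem_flatMap, List.mem_map, PySem.List.mem_pyRange_one]
  constructor
  · rintro ⟨x, hxK, h | h⟩
    · by_cases he : (rstripSlash x).toList.length = (rstripSlash url).toList.length
      · left
        refine ⟨rstripSlash x, ⟨x, hxK, rfl⟩, ?_⟩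
        have hpre : (rstripSlash url).toList <+: (rstripSlash x).toList := by
          rw [h.eq_of_length he]
        obtain ⟨j, hj, hjeq⟩ := (slice_ex_iff_prefix (rstripSlash url) (rstripSlash x)).mpr hpre
        exact ⟨j, hj, hjeq.symm⟩
      · right
        have hlt : (rstripSlash x).toList.length < (rstripSlash url).toList.length :=
          lt_of_le_of_ne h.length_le he
        obtain ⟨j, hj, hjeq⟩ :=
          (proper_slice_ex_iff_strict_prefix (rstripSlash url) (rstripSlash x)).mpr ⟨h, hlt⟩
        exact ⟨j, hj, x, hxK, hjeq⟩
    · left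
      refine ⟨rstripSlash x, ⟨x, hxK, rfl⟩, ?_⟩
      obtain ⟨j, hj, hjeq⟩ := (slice_ex_iff_prefix (rstripSlash url) (rstripSlash x)).mpr h
      exact ⟨j, hj, hjeq.symm⟩
  · rintro (⟨a, ⟨x, hxK, rfl⟩, j, hj, hjeq⟩ | ⟨j, hj, x, hxK, hjeq⟩)
    · exact ⟨x, hxK, Or.inr ((slice_ex_iff_prefix _ _).mp ⟨j, hj, hjeq.symm⟩)⟩
    · exact ⟨x, hxK, Or.inl ((proper_slice_ex_iff_strict_prefix _ _).mp ⟨j, hj, hjeq⟩).1⟩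

-- ===== VERDICT (by name: the statement is the Claim_ definition above) =====
theorem validate_urls_spec : Claim_equal_validate_urls := by
  intro report_urls citation_index _
  unfold Spec_validate_urls
  simp only [validate_urls, validate_urls_alt]
  congr 1
  funext violations url
  cases hd : (PySem.Str.startswith url "DOI:" || PySem.Str.isIn "doi.org" url) with
  | true => simp
  | false =>
    have hK := valid_eq url ((PySem.Dict.mk citation_index).keys)
    cases hc : PySem.Set.contains
        (PySem.Set.ofList ((PySem.Set.ofList (((PySem.Dict.mk citation_index).keys).map (fun k => rstripSlash k))).flatMap (fun a =>
          (PySem.List.pyRange 0 (PySem.Str.len a + 1) 1).map (fun k => PySem.Str.slice a none (some k)))))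
        (rstripSlash url) <;>
      cases ha : (PySem.List.pyRange 0 (PySem.Str.len (rstripSlash url)) 1).any
          (fun k => PySem.Set.contains (PySem.Set.ofList (((PySem.Dict.mk citation_index).keys).map (fun k => rstripSlash k)))
            (PySem.Str.slice (rstripSlash url) none (some k))) <;>
      rw [hK] <;> rw [hc, ha] <;> simp
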